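-- pv_equiv track=rewrite | github.com/prorokaleksandra/SpatialData | standardise.py | standardize_phenotype
-- ===== SOURCE A (Python) =====
-- def standardize_phenotype(phenotype):
--     markers = set()
--     start = 0
--     for i in range(len(phenotype)):
--         if phenotype[i] == '-' or phenotype[i] == '+':
--             markers.add(phenotype[start:i + 1])
--             start = i + 1
--     return ''.join(sorted(markers))
-- ===== SOURCE B (Python) =====
-- def standardize_phenotype(phenotype):
--     tokens = []
--     cur = ''
--     for ch in phenotype:
--         cur += ch
--         if ch == '+' or ch == '-':
--             tokens.append(cur)
--             cur = ''
--     return ''.join(sorted(set(tokens)))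
-- ===== Notes on version B (the rewrite author's own statement) =====
-- stated objective: simpler
-- what changed: Replaces A's index-tracking scan with per-iteration string slicing and in-loop set insertion by a token-accumulator pass that grows the current token char by char, emits it on each terminating sign character, and dedups/sorts once at the end.
import Mathlib
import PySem

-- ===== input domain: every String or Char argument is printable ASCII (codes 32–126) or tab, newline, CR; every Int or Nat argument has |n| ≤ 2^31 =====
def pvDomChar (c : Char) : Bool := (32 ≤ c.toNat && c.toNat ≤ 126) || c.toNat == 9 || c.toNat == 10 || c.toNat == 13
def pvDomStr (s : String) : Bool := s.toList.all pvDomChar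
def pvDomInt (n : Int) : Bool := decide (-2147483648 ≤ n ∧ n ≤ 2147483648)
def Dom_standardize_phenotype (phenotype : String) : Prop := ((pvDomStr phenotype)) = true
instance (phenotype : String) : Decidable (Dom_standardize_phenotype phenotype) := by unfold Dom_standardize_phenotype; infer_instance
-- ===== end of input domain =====

-- B replaces A's index-tracking/slicing scan by a token accumulator: it grows the current
-- token character by character, emits it on each terminating sign character, and dedups/sorts once at the end (objective: simpler).

-- ===== PORT A =====
-- for i in range(len(phenotype)): if phenotype[i] in '-+': markers.add(phenotype[start:i+1]); start = i+1
def standardize_phenotype (phenotype : String) : String :=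
  let res :=
    (PySem.List.pyRange 0 (PySem.Str.len phenotype) 1).foldl
      (fun (st : PySem.Set String × Int) i =>
        let c := PySem.List.pyGetD phenotype.toList i ' '   -- phenotype[i]; i is always in range here
        if c = '-' ∨ c = '+' then
          (PySem.Set.add st.1 (PySem.Str.slice phenotype (some st.2) (some (i + 1))), i + 1)
        else st)
      (PySem.Set.empty, 0)
  PySem.Str.join "" (PySem.List.sorted res.1 (fun x => x))

-- ===== PORT B =====
-- the token accumulator loop of Source B: cur grows by each char; a sign character emits cur and resets it
def pvTokensB : List Char → List Char → List String
  | _, [] => []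
  | cur, ch :: rest =>
    let cur' := cur ++ [ch]
    if ch = '+' ∨ ch = '-' then String.ofList cur' :: pvTokensB [] rest
    else pvTokensB cur' rest

def standardize_phenotype_alt (phenotype : String) : String :=
  PySem.Str.join ""
    (PySem.List.sorted (PySem.Set.ofList (pvTokensB [] phenotype.toList)) (fun x => x))

-- ===== PRECONDITION & SPEC =====
def Spec_standardize_phenotype (phenotype : String) (out : String) : Prop := out = standardize_phenotype_alt phenotype
instance (phenotype : String) (out : String) : Decidable (Spec_standardize_phenotype phenotype out) := by unfold Spec_standardize_phenotype; infer_instance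

-- ===== CLAIM (what is proved, stated in full; the proofs are below) =====
def Claim_equal_standardize_phenotype : Prop := ∀ (phenotype : String), Dom_standardize_phenotype phenotype → Spec_standardize_phenotype phenotype (standardize_phenotype phenotype)

-- ===== LEMMAS AND PROOFS =====

lemma pv_getD_append_cons (l1 l2 : List Char) (c : Char) (d : Char) :
    (l1 ++ c :: l2).getD l1.length d = c := by
  induction l1 with
  | nil => rfl
  | cons x t ih => simp [ih]

-- A's loop, started having consumed `e ++ acc` (tokens of `e` already emitted, `acc` the
-- pending chars since the last sign), adds to M exactly the tokens B extracts from `rest`.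
lemma pv_loop_eq (cs : List Char) : ∀ (rest e acc : List Char) (M : PySem.Set String),
    cs = e ++ acc ++ rest →
    ((PySem.List.pyRange ((e.length + acc.length : Nat) : Int) ((cs.length : Nat) : Int) 1).foldl
      (fun (st : PySem.Set String × Int) i =>
        let c := PySem.List.pyGetD cs i ' '
        if c = '-' ∨ c = '+' then
          (PySem.Set.add st.1 (String.ofList (PySem.Chars.slice cs (some st.2) (some (i + 1)))), i + 1)
        else st)
      (M, ((e.length : Nat) : Int))).1
    = (pvTokensB acc rest).foldl (fun s t => PySem.Set.add s t) M := by
  intro rest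
  induction rest with
  | nil =>
    intro e acc M h
    subst h
    rw [PySem.List.pyRange_one_eq_nil (by simp)]
    simp [pvTokensB]
  | cons ch r ih =>
    intro e acc M h
    have hlen : ((e.length + acc.length : Nat) : Int) < ((cs.length : Nat) : Int) := by
      subst h; simp only [List.length_append, List.length_cons]; push_cast; omega
    rw [PySem.List.pyRange_one_cons hlen]
    have hget : PySem.List.pyGetD cs ((e.length + acc.length : Nat) : Int) ' ' = ch := by
      rw [PySem.List.pyGetD_natCast]
      have : cs = (e ++ acc) ++ ch :: r := by simp [h]
      rw [this]
      simp [pv_getD_append_cons (e ++ acc) r ch ' ']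
    simp only [List.foldl_cons, hget]
    by_cases hc : ch = '-' ∨ ch = '+'
    · simp only [if_pos hc]
      have hslice : PySem.Chars.slice cs (some ((e.length : Nat) : Int))
          (some (((e.length + acc.length : Nat) : Int) + 1)) = acc ++ [ch] := by
        have h1 : (((e.length + acc.length : Nat) : Int) + 1)
            = ((e.length + acc.length + 1 : Nat) : Int) := by push_cast; ring
        rw [h1]; show PySem.List.slice cs (some ((e.length : Nat) : Int)) (some ((e.length + acc.length + 1 : Nat) : Int)) = acc ++ [ch]
        rw [PySem.List.slice_natCast, h]
        rw [show e ++ acc ++ ch :: r = e ++ (acc ++ ch :: r) by simp, List.drop_left']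
        have : e.length + acc.length + 1 - e.length = acc.length + 1 := by omega
        rw [this, show acc.length + 1 = acc.length + (1 : Nat) from rfl,
          List.take_length_add_append]
        simp
        rfl
      rw [hslice]
      have h2 : (((e.length + acc.length : Nat) : Int) + 1)
          = (((e ++ acc ++ [ch]).length : Nat) : Int) := by push_cast; simp; ring
      rw [h2]
      have := ih (e ++ acc ++ [ch]) [] (PySem.Set.add M (String.ofList (acc ++ [ch])))
        (by simp [h])
      simp only [List.length_nil, Nat.add_zero] at this
      rw [this]
      have hcomm : ch = '+' ∨ ch = '-' := hc.symm
      simp [pvTokensB, if_pos hcomm]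
    · simp only [if_neg hc]
      have h2 : (((e.length + acc.length : Nat) : Int) + 1)
          = ((e.length + (acc ++ [ch]).length : Nat) : Int) := by push_cast; simp; ring
      rw [h2]
      have := ih e (acc ++ [ch]) M (by simp [h])
      rw [this]
      have hcomm : ¬ (ch = '+' ∨ ch = '-') := by tauto
      simp [pvTokensB, if_neg hcomm]

-- ===== VERDICT (by name: the statement is the Claim_ definition above) =====
theorem standardize_phenotype_spec : Claim_equal_standardize_phenotype := by
  intro phenotype _
  unfold Spec_standardize_phenotype standardize_phenotype standardize_phenotype_alt
  have h0 : PySem.Str.len phenotype = ((phenotype.toList.length : Nat) : Int) := by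
    simp [PySem.Str.len_eq]
  have hs : ∀ (st : PySem.Set String × Int) (i : Int),
      PySem.Str.slice phenotype (some st.2) (some (i + 1))
        = String.ofList (PySem.Chars.slice phenotype.toList (some st.2) (some (i + 1))) := by
    intro st i; rfl
  have hmain := pv_loop_eq phenotype.toList phenotype.toList [] [] PySem.Set.empty (by simp)
  simp only [List.length_nil, Nat.add_zero] at hmain
  simp only [h0, hs, Nat.cast_zero] at *
  rw [hmain]
  congr 1
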